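-- pv_equiv track=rewrite | github.com/volhadounar/Python_tricks | tasks_for_Marharyta.py | get_pairs
-- ===== SOURCE A (Python) =====
-- def rotate(A, k):
--     return A[k:]+A[0:k]
--
-- def get_pairs(lst: list):
--     res = []
--     times_to_rotate = len(lst)
--     lst_rotated = lst
--     for i in range(times_to_rotate):
--         lst_rotated = rotate(lst_rotated, 1)
--         res.extend(zip(lst, lst_rotated))
--     return tuple(res)
-- ===== SOURCE B (Python) =====
-- def get_pairs(lst: list):
--     n = len(lst)
--     return tuple((lst[j], lst[(j + i) % n]) for i in range(1, n + 1) for j in range(n))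
-- ===== Notes on version B (the rewrite author's own statement) =====
-- stated objective: simpler
-- what changed: Replaced the maintained rotated-list copy (repeated slicing plus zip per shift) with a single stateless nested comprehension producing (lst[j], lst[(j+i)%n]) by modular index arithmetic.
import Mathlib
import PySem

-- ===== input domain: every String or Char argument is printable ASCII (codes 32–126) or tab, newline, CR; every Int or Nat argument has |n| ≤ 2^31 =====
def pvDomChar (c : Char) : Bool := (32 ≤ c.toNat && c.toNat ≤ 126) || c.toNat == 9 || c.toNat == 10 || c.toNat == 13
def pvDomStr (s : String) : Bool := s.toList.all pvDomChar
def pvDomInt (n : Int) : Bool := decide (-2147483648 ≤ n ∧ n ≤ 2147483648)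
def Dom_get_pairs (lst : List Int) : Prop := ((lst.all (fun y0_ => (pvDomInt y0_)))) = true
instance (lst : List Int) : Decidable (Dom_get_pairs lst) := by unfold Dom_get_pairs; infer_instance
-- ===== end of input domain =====

-- B replaces A's maintained rotated copy (slice-rotate + zip each iteration) with a single
-- stateless nested comprehension using modular index arithmetic; return value only (tuple → List).

-- ===== PORT A =====
def pyRotate (A : List Int) (k : Int) : List Int :=
  PySem.List.slice A (some k) none ++ PySem.List.slice A (some 0) (some k)

def get_pairs (lst : List Int) : List (Int × Int) :=
  let times_to_rotate : Int := lst.length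
  let st := (PySem.List.pyRange 0 times_to_rotate 1).foldl
    (fun (st : List (Int × Int) × List Int) _ =>
      let r := pyRotate st.2 1
      (st.1 ++ lst.zip r, r)) ([], lst)
  st.1

-- ===== PORT B =====
def get_pairs_alt (lst : List Int) : List (Int × Int) :=
  let n : Int := lst.length
  (PySem.List.pyRange 1 (n + 1) 1).flatMap (fun i =>
    (PySem.List.pyRange 0 n 1).map (fun j =>
      (PySem.List.pyGetD lst j 0, PySem.List.pyGetD lst (PySem.Int.mod (j + i) n) 0)))

-- ===== PRECONDITION & SPEC =====
def Spec_get_pairs (lst : List Int) (out : List (Int × Int)) : Prop := out = get_pairs_alt lst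
instance (lst : List Int) (out : List (Int × Int)) : Decidable (Spec_get_pairs lst out) := by unfold Spec_get_pairs; infer_instance

-- ===== CLAIM (what is proved, stated in full; the proofs are below) =====
def Claim_equal_get_pairs : Prop := ∀ (lst : List Int), Dom_get_pairs lst → Spec_get_pairs lst (get_pairs lst)

-- ===== LEMMAS AND PROOFS =====

/-- Left rotation by `k`: the reference form both sides are reduced to. -/
def rotN (lst : List Int) (k : Nat) : List Int := lst.drop k ++ lst.take k

lemma rotN_length (lst : List Int) (k : Nat) : (rotN lst k).length = lst.length := by
  simp [rotN]; omega

lemma pyRotate_eq (r : List Int) (h : 0 < r.length) :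
    pyRotate r 1 = r.drop 1 ++ r.take 1 := by
  have h1 : min 1 r.length = 1 := by omega
  simp [pyRotate, PySem.List.slice, h1, List.take_of_length_le]

lemma pyRotate_rotN (lst : List Int) (k : Nat) (hk : k < lst.length) :
    pyRotate (rotN lst k) 1 = rotN lst (k + 1) := by
  rw [pyRotate_eq _ (by rw [rotN_length]; omega)]
  have hd : lst.drop k = lst[k] :: lst.drop (k + 1) := List.drop_eq_getElem_cons hk
  have ht : lst.take (k + 1) = lst.take k ++ [lst[k]] := by
    rw [List.take_add_one]; simp [List.getElem?_eq_getElem hk]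
  unfold rotN
  rw [hd, ht]
  simp only [List.cons_append, List.drop_succ_cons, List.drop_zero, List.take_succ_cons,
    List.take_zero, List.append_assoc]

lemma rotN_getElem (lst : List Int) (k j : Nat) (hk : k ≤ lst.length)
    (hj : j < lst.length) :
    (rotN lst k).getD j 0 = lst.getD ((j + k) % lst.length) 0 := by
  rcases Nat.lt_or_ge j (lst.length - k) with h | h
  · have hjk : k + j < lst.length := by omega
    have : (rotN lst k).getD j 0 = (lst.drop k).getD j 0 := by
      rw [rotN, List.getD_append _ _ _ _ (by simp; omega)]
    rw [this, List.getD_eq_getElem?_getD, List.getElem?_drop]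
    have hmod : (j + k) % lst.length = k + j := by
      rw [Nat.mod_eq_of_lt (by omega)]; omega
    rw [hmod, List.getD_eq_getElem?_getD]
  · have hlen : (lst.drop k).length = lst.length - k := by simp
    have : (rotN lst k).getD j 0 = (lst.take k).getD (j - (lst.length - k)) 0 := by
      rw [rotN, List.getD_append_right _ _ _ _ (by simp; omega)]
      congr 1; simp
    rw [this, List.getD_eq_getElem?_getD, List.getElem?_take]
    have hlt : j - (lst.length - k) < k := by omega
    have hmod : (j + k) % lst.length = j - (lst.length - k) := by
      have h1 : j + k = (j - (lst.length - k)) + lst.length := by omega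
      rw [h1, Nat.add_mod_right, Nat.mod_eq_of_lt (by omega)]
    simp [hlt, hmod, List.getD_eq_getElem?_getD]

lemma zip_rotN (lst : List Int) (k : Nat) (hk : k ≤ lst.length) :
    lst.zip (rotN lst k) =
      (List.range lst.length).map
        (fun j => (lst.getD j 0, lst.getD ((j + k) % lst.length) 0)) := by
  apply List.ext_getElem
  · simp [rotN_length]
  · intro j h1 h2
    have hj : j < lst.length := by
      simpa [rotN_length] using h1
    have hjr : j < (rotN lst k).length := by rw [rotN_length]; exact hj
    simp only [List.getElem_zip, List.getElem_map, List.getElem_range, Prod.mk.injEq]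
    refine ⟨?_, ?_⟩
    · simp [List.getD_eq_getElem?_getD, List.getElem?_eq_getElem hj]
    · rw [← rotN_getElem lst k j hk hj]
      simp [List.getD_eq_getElem?_getD, List.getElem?_eq_getElem hjr]

/-- The A-side loop invariant: folding over any dummy list of the right length
    starting from rotation `k` produces the segments for shifts `k+1 …`. -/
lemma loopA (lst : List Int) (L : List Int) (k : Nat) (acc : List (Int × Int))
    (h : k + L.length = lst.length) :
    (L.foldl (fun (st : List (Int × Int) × List Int) _ =>
        (st.1 ++ lst.zip (pyRotate st.2 1), pyRotate st.2 1)) (acc, rotN lst k)).1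
      = acc ++ (List.range L.length).flatMap (fun t => lst.zip (rotN lst (k + t + 1))) := by
  induction L generalizing k acc with
  | nil => simp
  | cons x xs ih =>
    have hk : k < lst.length := by simp at h; omega
    simp only [List.foldl_cons, pyRotate_rotN lst k hk]
    rw [ih (k + 1) _ (by simp at h ⊢; omega)]
    rw [List.length_cons, List.range_succ_eq_map]
    simp only [List.flatMap_cons, List.flatMap_map, List.append_assoc]
    have harg : ∀ t : Nat, k + 1 + t + 1 = k + (t + 1) + 1 := fun t => by omega
    simp [harg]

lemma rotN_zero (lst : List Int) : rotN lst 0 = lst := by simp [rotN]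

/-- A reduced to the reference form. -/
lemma get_pairs_eq (lst : List Int) :
    get_pairs lst = (List.range lst.length).flatMap
      (fun t => lst.zip (rotN lst (t + 1))) := by
  unfold get_pairs
  have hlen : (PySem.List.pyRange 0 (lst.length : Int) 1).length = lst.length := by
    rw [PySem.List.length_pyRange_one]; omega
  have hL := loopA lst (PySem.List.pyRange 0 (lst.length : Int) 1) 0 [] (by rw [hlen]; omega)
  rw [rotN_zero] at hL
  dsimp only
  rw [hL, hlen]
  simp

/-- B reduced to the reference form. -/
lemma get_pairs_alt_eq (lst : List Int) :
    get_pairs_alt lst = (List.range lst.length).flatMap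
      (fun t => lst.zip (rotN lst (t + 1))) := by
  unfold get_pairs_alt
  dsimp only
  rw [PySem.List.pyRange_one 1 ((lst.length : Int) + 1),
      PySem.List.pyRange_one 0 (lst.length : Int)]
  have h1 : ((lst.length : Int) + 1 - 1).toNat = lst.length := by omega
  have h0 : ((lst.length : Int) - 0).toNat = lst.length := by omega
  rw [h1, h0]
  simp only [List.flatMap_map]
  apply List.flatMap_congr
  intro t ht
  rw [zip_rotN lst (t + 1) (by simpa using List.mem_range.mp ht)]
  rw [List.map_map]
  apply List.map_congr_left
  intro j hj
  have hjn : j < lst.length := List.mem_range.mp hj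
  have htn : t < lst.length := List.mem_range.mp ht
  simp only [Function.comp, Prod.mk.injEq]
  refine ⟨?_, ?_⟩
  · simp [PySem.List.pyGetD_natCast]
  · have hcast : ((0 : Int) + (j : Int)) + (1 + (t : Int)) = ((j + (1 + t) : Nat) : Int) := by
      push_cast; ring
    rw [hcast, PySem.Int.mod_natCast, PySem.List.pyGetD_natCast]
    congr 2
    omega

-- ===== VERDICT (by name: the statement is the Claim_ definition above) =====
theorem get_pairs_spec : Claim_equal_get_pairs := by
  intro lst _
  unfold Spec_get_pairs
  rw [get_pairs_eq, get_pairs_alt_eq]
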